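-- pv_equiv track=rewrite | github.com/UlrichBerntien/Codewars-Katas | 7_kyu/Quicksum.py | quicksum
-- ===== SOURCE A (Python) =====
-- def quicksum(packet: str) -> int:
--     """
--     Returns the "Quicksum" checksum value for packet.
--     Returns 0 on invalid character (not upper letter and not space) in packet.
--     """
--     # constant charset index values
--     ord_space = ord(' ')
--     ord_a = ord('A')
--     ord_z = ord('Z')
--     # this implementation needs character set ordered A..Z (e.g. ASCII but not EBCDIC)
--     assert ord_z-ord_a == 25
--     # offset between ord character and value in sum
--     offset = ord_a-1
--     # sum
--     accu = 0
--     for i,c in enumerate(packet):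
--         ord_c = ord(c)
--         if ord_a <= ord_c <= ord_z:
--             accu += (i+1)*(ord_c-offset)
--         elif ord_c != ord_space:
--             # quick exit if character is invalid
--             return 0
--     return accu
-- ===== SOURCE B (Python) =====
-- def quicksum(packet: str) -> int:
--     if any(not ('A' <= c <= 'Z' or c == ' ') for c in packet):
--         return 0
--     return sum((i + 1) * (ord(c) - 64) for i, c in enumerate(packet) if 'A' <= c <= 'Z')
-- ===== Notes on version B (the rewrite author's own statement) =====
-- stated objective: simpler
-- what changed: Replaced the single classify-and-accumulate loop with early return by a validation pass (any) followed by a separate filtered weighted-sum comprehension.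
import Mathlib
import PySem

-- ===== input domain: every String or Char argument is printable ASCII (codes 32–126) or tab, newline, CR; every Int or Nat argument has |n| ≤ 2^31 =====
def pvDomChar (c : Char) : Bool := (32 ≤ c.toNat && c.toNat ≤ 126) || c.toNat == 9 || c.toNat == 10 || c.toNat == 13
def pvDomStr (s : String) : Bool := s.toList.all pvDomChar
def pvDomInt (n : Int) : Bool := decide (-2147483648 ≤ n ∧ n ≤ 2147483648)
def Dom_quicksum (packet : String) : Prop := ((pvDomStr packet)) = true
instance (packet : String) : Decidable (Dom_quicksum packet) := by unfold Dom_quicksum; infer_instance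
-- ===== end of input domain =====

-- ===== PORT A =====
-- A: single loop over enumerate(packet) that accumulates (i+1)*(ord(c)-64) for
-- uppercase letters, skips spaces, and returns 0 immediately on any other char.
def quicksumGo : List Char → Int → Int → Int
  | [], _, accu => accu
  | c :: rest, i, accu =>
    let ord_c : Int := c.toNat
    if 65 ≤ ord_c ∧ ord_c ≤ 90 then
      quicksumGo rest (i + 1) (accu + (i + 1) * (ord_c - 64))
    else if ord_c ≠ 32 then 0
    else quicksumGo rest (i + 1) accu

def quicksum (packet : String) : Int :=
  quicksumGo packet.toList 0 0

-- ===== PORT B =====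
-- B (simpler decomposition): a validation pass, then a separate filtered weighted sum.
def quicksum_alt (packet : String) : Int :=
  if packet.toList.any (fun c => !(decide ('A' ≤ c ∧ c ≤ 'Z') || c == ' ')) then 0
  else
    (PySem.List.enumerate packet.toList 0).foldl
      (fun s p => if 'A' ≤ p.2 ∧ p.2 ≤ 'Z' then s + (p.1 + 1) * ((p.2.toNat : Int) - 64) else s) 0

-- ===== PRECONDITION & SPEC =====
def Spec_quicksum (packet : String) (out : Int) : Prop := out = quicksum_alt packet
instance (packet : String) (out : Int) : Decidable (Spec_quicksum packet out) := by unfold Spec_quicksum; infer_instance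

-- ===== CLAIM (what is proved, stated in full; the proofs are below) =====
def Claim_equal_quicksum : Prop := ∀ (packet : String), Dom_quicksum packet → Spec_quicksum packet (quicksum packet)

-- ===== LEMMAS AND PROOFS =====

theorem upper_iff (c : Char) : ('A' ≤ c ∧ c ≤ 'Z') ↔ (65 ≤ (c.toNat : Int) ∧ (c.toNat : Int) ≤ 90) := by
  constructor
  · rintro ⟨h1, h2⟩
    have h1' : 'A'.val ≤ c.val := h1
    have h2' : c.val ≤ 'Z'.val := h2
    rw [UInt32.le_iff_toNat_le] at h1' h2'
    constructor <;> [exact_mod_cast h1'; exact_mod_cast h2']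
  · rintro ⟨h1, h2⟩
    have h1' : 'A'.toNat ≤ c.toNat := by exact_mod_cast h1
    have h2' : c.toNat ≤ 'Z'.toNat := by exact_mod_cast h2
    exact ⟨UInt32.le_iff_toNat_le.mpr h1', UInt32.le_iff_toNat_le.mpr h2'⟩

theorem space_iff (c : Char) : (c == ' ') = true ↔ ((c.toNat : Int) = 32) := by
  constructor
  · intro h; rw [beq_iff_eq] at h; subst h; decide
  · intro h
    have h' : c.toNat = 32 := by exact_mod_cast h
    rw [beq_iff_eq]
    exact Char.ext (UInt32.toNat_inj.mp h')

theorem go_eq (l : List Char) : ∀ (i accu : Int),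
    quicksumGo l i accu =
      if l.any (fun c => !(decide ('A' ≤ c ∧ c ≤ 'Z') || c == ' ')) then 0
      else (PySem.List.enumerate l i).foldl
        (fun s p => if 'A' ≤ p.2 ∧ p.2 ≤ 'Z' then s + (p.1 + 1) * ((p.2.toNat : Int) - 64) else s) accu := by
  induction l with
  | nil => intro i accu; simp [quicksumGo, PySem.List.enumerate_nil]
  | cons c rest ih =>
    intro i accu
    simp only [quicksumGo, List.any_cons, PySem.List.enumerate_cons, List.foldl_cons]
    by_cases hu : 65 ≤ c.toNat ∧ c.toNat ≤ 90
    · have huI : 65 ≤ (c.toNat : Int) ∧ (c.toNat : Int) ≤ 90 := by exact_mod_cast hu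
      have hu' : ('A' ≤ c ∧ c ≤ 'Z') := (upper_iff c).mpr huI
      simp only [if_pos huI, if_pos hu']
      rw [ih]
      simp [hu']
    · have huI : ¬ (65 ≤ (c.toNat : Int) ∧ (c.toNat : Int) ≤ 90) := by
        intro h; exact hu (by exact_mod_cast h)
      have hu' : ¬ ('A' ≤ c ∧ c ≤ 'Z') := fun h => huI ((upper_iff c).mp h)
      by_cases hs : (c.toNat : Int) = 32
      · have hs' : (c == ' ') = true := (space_iff c).mpr hs
        have hsne : ¬ ((c.toNat : Int) ≠ 32) := fun h => h hs
        simp only [if_neg huI, if_neg hu', if_neg hsne]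
        rw [ih]
        simp [hu', hs']
      · have hs' : ¬ (c == ' ') = true := fun h => hs ((space_iff c).mp h)
        simp only [if_neg huI, if_neg hu', if_pos hs]
        simp [hu', hs']

-- ===== VERDICT (by name: the statement is the Claim_ definition above) =====
theorem quicksum_spec : Claim_equal_quicksum := by
  intro packet _
  unfold Spec_quicksum quicksum quicksum_alt
  exact go_eq packet.toList 0 0
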